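-- pv_equiv track=rewrite | github.com/mimicria/academy-it | dz11.py | is_three_even
-- ===== SOURCE A (Python) =====
-- def is_three_even(arr):
--     N = len(arr)
--     i = 0
--     cnt = 0
--     while i < N:
--         if arr[i] % 2:
--             cnt = 0
--         else:
--             cnt += 1
--             if cnt == 3:
--                 return True
--         i += 1
--     return False
-- ===== SOURCE B (Python) =====
-- def is_three_even(arr):
--     return any(a % 2 == 0 and b % 2 == 0 and c % 2 == 0
--                for a, b, c in zip(arr, arr[1:], arr[2:]))
-- ===== Notes on version B (the rewrite author's own statement) =====
-- stated objective: idiomatic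
-- what changed: Replaces the stateful index loop with a resetting counter by a stateless one-liner: any() over the zipped triple windows (arr, arr[1:], arr[2:]).
import Mathlib
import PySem

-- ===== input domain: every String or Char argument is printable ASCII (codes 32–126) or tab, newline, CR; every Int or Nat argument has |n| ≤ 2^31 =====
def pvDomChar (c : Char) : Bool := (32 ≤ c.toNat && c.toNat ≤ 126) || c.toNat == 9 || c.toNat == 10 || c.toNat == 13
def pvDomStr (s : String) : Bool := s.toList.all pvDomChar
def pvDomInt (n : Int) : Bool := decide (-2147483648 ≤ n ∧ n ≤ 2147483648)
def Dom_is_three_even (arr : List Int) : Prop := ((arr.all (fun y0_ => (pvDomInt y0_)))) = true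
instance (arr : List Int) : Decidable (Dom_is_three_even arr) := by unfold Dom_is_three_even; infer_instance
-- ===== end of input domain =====

-- B replaces A's stateful resetting-counter loop by a stateless any() over zipped triple windows; objective: idiomatic.

-- ===== PORT A =====
-- A's while loop over indices with a resetting counter cnt, transliterated as
-- structural recursion over the list carrying the same counter state (cnt : Int as in Python).
def is_three_evenGo : List Int → Int → Bool
  | [], _ => false
  | x :: xs, cnt =>
    if x % 2 ≠ 0 then is_three_evenGo xs 0
    else if cnt + 1 = 3 then true
    else is_three_evenGo xs (cnt + 1)

def is_three_even (arr : List Int) : Bool := is_three_evenGo arr 0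

-- ===== PORT B =====
-- any(... for a, b, c in zip(arr, arr[1:], arr[2:])); arr[1:], arr[2:] are PySem slices,
-- zip of three is the nested List.zip with the tuple (a, (b, c)).
def is_three_even_alt (arr : List Int) : Bool :=
  ((arr.zip ((PySem.List.slice arr (some 1) none).zip (PySem.List.slice arr (some 2) none))).any
    fun t => t.1 % 2 == 0 && t.2.1 % 2 == 0 && t.2.2 % 2 == 0)

-- ===== PRECONDITION & SPEC =====
def Spec_is_three_even (arr : List Int) (out : Bool) : Prop := out = is_three_even_alt arr
instance (arr : List Int) (out : Bool) : Decidable (Spec_is_three_even arr out) := by unfold Spec_is_three_even; infer_instance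

-- ===== CLAIM (what is proved, stated in full; the proofs are below) =====
def Claim_equal_is_three_even : Prop := ∀ (arr : List Int), Dom_is_three_even arr → Spec_is_three_even arr (is_three_even arr)

-- ===== LEMMAS AND PROOFS =====

-- three consecutive even numbers somewhere in the list, as a stateless window predicate
def win : List Int → Bool
  | a :: b :: c :: r => (a % 2 == 0 && b % 2 == 0 && c % 2 == 0) || win (b :: c :: r)
  | _ => false

-- pref xs k : xs starts with at least k even numbers
def pref : List Int → Nat → Bool
  | _, 0 => true
  | [], _ + 1 => false
  | x :: xs, k + 1 => (x % 2 == 0) && pref xs k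

@[simp] theorem win_nil : win [] = false := rfl
@[simp] theorem win_one (a : Int) : win [a] = false := rfl
@[simp] theorem win_two (a b : Int) : win [a, b] = false := rfl
@[simp] theorem win_cons3 (a b c : Int) (r : List Int) :
    win (a :: b :: c :: r) = ((a % 2 == 0 && b % 2 == 0 && c % 2 == 0) || win (b :: c :: r)) := rfl
@[simp] theorem pref_zero : ∀ xs : List Int, pref xs 0 = true
  | [] => rfl
  | _ :: _ => rfl
@[simp] theorem pref_nil (k : Nat) : pref [] (k + 1) = false := rfl
@[simp] theorem pref_cons (x : Int) (xs : List Int) (k : Nat) :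
    pref (x :: xs) (k + 1) = ((x % 2 == 0) && pref xs k) := rfl

theorem pref3_absorb : ∀ xs : List Int, (pref xs 3 || win xs) = win xs := by
  intro xs
  match xs with
  | [] => rfl
  | [a] => simp
  | [a, b] => simp
  | a :: b :: c :: r =>
    simp only [pref_cons, pref_zero, win_cons3, Bool.and_true]
    cases a % 2 == 0 <;> cases b % 2 == 0 <;> cases c % 2 == 0 <;> simp

theorem win_cons_even (x : Int) (xs : List Int) (hx : (x % 2 == 0) = true) :
    win (x :: xs) = (pref xs 2 || win xs) := by
  match xs with
  | [] => simp
  | [b] => simp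
  | b :: c :: r => simp [hx]

theorem pref2_false (xs : List Int) (h1 : pref xs 1 = false) : pref xs 2 = false := by
  match xs with
  | [] => rfl
  | b :: t =>
    simp only [pref_cons, pref_zero, Bool.and_true] at h1
    simp [h1]

theorem goA_eq : ∀ (xs : List Int) (c : Int), 0 ≤ c → c ≤ 2 →
    is_three_evenGo xs c = (pref xs (3 - c).toNat || win xs) := by
  intro xs
  induction xs with
  | nil =>
    intro c _ hc2
    obtain ⟨k, hk⟩ : ∃ k, (3 - c).toNat = k + 1 := ⟨(3 - c).toNat - 1, by omega⟩
    rw [hk]; rfl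
  | cons x xs ih =>
    intro c hc0 hc2
    rcases (show x % 2 = 0 ∨ x % 2 = 1 by omega) with hx | hx
    · -- x even
      have hxb : (x % 2 == 0) = true := by simp [hx]
      by_cases h3 : c + 1 = 3
      · have hc : c = 2 := by omega
        subst hc
        have : is_three_evenGo (x :: xs) 2 = true := by simp [is_three_evenGo, hx]
        rw [this, show ((3 : Int) - 2).toNat = 1 from rfl]
        simp [hxb]
      · have hrec : is_three_evenGo (x :: xs) c = is_three_evenGo xs (c + 1) := by
          simp [is_three_evenGo, hx, h3]
        rw [hrec, ih (c + 1) (by omega) (by omega), win_cons_even x xs hxb]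
        rcases (show c = 0 ∨ c = 1 by omega) with hc | hc <;> subst hc
        · rw [show ((3 : Int) - (0 + 1)).toNat = 2 from rfl,
              show ((3 : Int) - 0).toNat = 3 from rfl]
          rw [show (3 : Nat) = 2 + 1 from rfl, pref_cons, hxb, Bool.true_and]
          cases pref xs 2 <;> simp
        · rw [show ((3 : Int) - (1 + 1)).toNat = 1 from rfl,
              show ((3 : Int) - 1).toNat = 2 from rfl]
          rw [show (2 : Nat) = 1 + 1 from rfl, pref_cons, hxb, Bool.true_and]
          cases h1 : pref xs 1
          · rw [pref2_false xs h1]; simp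
          · simp
    · -- x odd: counter resets
      have hxb : (x % 2 == 0) = false := by simp [hx]
      have hrec : is_three_evenGo (x :: xs) c = is_three_evenGo xs 0 := by
        simp [is_three_evenGo, hx]
      rw [hrec, ih 0 le_rfl (by omega), show ((3 : Int) - 0).toNat = 3 from rfl, pref3_absorb]
      obtain ⟨k, hk⟩ : ∃ k, (3 - c).toNat = k + 1 := ⟨(3 - c).toNat - 1, by omega⟩
      rw [hk, pref_cons, hxb, Bool.false_and, Bool.false_or]
      have hwin : win (x :: xs) = win xs := by
        match xs with
        | [] => rfl
        | [b] => rfl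
        | b :: c' :: r => simp [hxb]
      rw [hwin]

theorem slice_one (xs : List Int) : PySem.List.slice xs (some 1) none = xs.drop 1 := by
  simpa using PySem.List.slice_from_natCast (xs := xs) (a := 1)

theorem slice_two (xs : List Int) : PySem.List.slice xs (some 2) none = xs.drop 2 := by
  simpa using PySem.List.slice_from_natCast (xs := xs) (a := 2)

theorem alt_eq_win : ∀ arr : List Int, is_three_even_alt arr = win arr := by
  intro arr
  induction arr with
  | nil => rfl
  | cons a xs ih =>
    match xs, ih with
    | [], _ => rfl
    | [b], _ => rfl
    | b :: c :: r, ih =>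
      simp only [is_three_even_alt, slice_one, slice_two, List.drop, List.zip] at ih ⊢
      simp only [List.zipWith_cons_cons, List.any_cons] at ih ⊢
      rw [win_cons3, ← ih, Bool.and_assoc]

-- ===== VERDICT (by name: the statement is the Claim_ definition above) =====
theorem is_three_even_spec : Claim_equal_is_three_even := by
  intro arr _
  show is_three_even arr = is_three_even_alt arr
  rw [alt_eq_win, is_three_even, goA_eq arr 0 le_rfl (by omega),
      show ((3 : Int) - 0).toNat = 3 from rfl, pref3_absorb]
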